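-- pv_equiv track=rewrite | github.com/ikeed/jaigbot | app/services/chat_helpers.py | strip_appointment_headers
-- ===== SOURCE A (Python) =====
-- def strip_appointment_headers(text: str) -> str:
--     """Remove scenario header lines like 'Parent:', 'Patient:', 'Purpose:', 'Notes:' from text.
--
--     Intended for sanitizing the very first assistant reply so we don't show a duplicate
--     appointment summary when the UI already displayed a scenario card.
--     """
--     if not text:
--         return text
--     lines = (text or "").splitlines()
--     kept: list[str] = []
--     for ln in lines:
--         lt = ln.strip()
--         if not lt:
--             # Preserve single blank lines; we will collapse later
--             kept.append("")
--             continue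
--         ltl = lt.lower()
--         if (
--             ltl.startswith("parent:")
--             or ltl.startswith("patient:")
--             or ltl.startswith("purpose:")
--             or ltl.startswith("notes:")
--         ):
--             # Skip header line
--             continue
--         kept.append(lt)
--     # Collapse multiple blank lines
--     out_lines: list[str] = []
--     prev_blank = False
--     for ln in kept:
--         if ln == "":
--             if prev_blank:
--                 continue
--             prev_blank = True
--             out_lines.append("")
--         else:
--             prev_blank = False
--             out_lines.append(ln)
--     return "\n".join(out_lines).strip()
-- ===== SOURCE B (Python) =====
-- def strip_appointment_headers(text: str) -> str:
--     """Remove scenario header lines like 'Parent:', 'Patient:', 'Purpose:', 'Notes:' from text."""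
--     paras: list[str] = []
--     cur: list[str] = []
--     for ln in text.splitlines():
--         lt = ln.strip()
--         if not lt:
--             if cur:
--                 paras.append("\n".join(cur))
--                 cur = []
--         elif not lt.lower().startswith(("parent:", "patient:", "purpose:", "notes:")):
--             cur.append(lt)
--     if cur:
--         paras.append("\n".join(cur))
--     return "\n\n".join(paras)
-- ===== Notes on version B (the rewrite author's own statement) =====
-- stated objective: simpler
-- what changed: B replaces A's three-stage pipeline (kept-list build, prev_blank blank-collapse state machine, join plus final strip) by a single fused pass that accumulates paragraphs (runs of non-blank, non-header stripped lines) and joins the paragraphs with a blank-line separator, so no blank sentinels, no collapse pass and no trailing strip are needed.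
import Mathlib
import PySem

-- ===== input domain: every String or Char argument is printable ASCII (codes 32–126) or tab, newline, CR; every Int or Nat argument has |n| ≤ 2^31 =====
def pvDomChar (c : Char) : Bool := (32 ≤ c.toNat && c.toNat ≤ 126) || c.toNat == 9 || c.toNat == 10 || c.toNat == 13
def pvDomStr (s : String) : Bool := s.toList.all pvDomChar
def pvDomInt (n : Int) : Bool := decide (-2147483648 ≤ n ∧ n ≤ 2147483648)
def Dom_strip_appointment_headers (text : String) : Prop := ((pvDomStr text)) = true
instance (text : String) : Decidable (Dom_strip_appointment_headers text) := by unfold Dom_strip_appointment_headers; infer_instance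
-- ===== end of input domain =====

-- B rebuilds the text as paragraphs accumulated in one fused pass and joined with "\n\n",
-- replacing A's kept-list + blank-collapse state machine + final strip (objective: simpler).

-- ===== PORT A =====
-- the four case-insensitive header tests of A (Python: ltl.startswith("parent:") or …)
def pvIsHeader (ltl : String) : Bool :=
  PySem.Str.startswith ltl "parent:" || PySem.Str.startswith ltl "patient:" ||
  PySem.Str.startswith ltl "purpose:" || PySem.Str.startswith ltl "notes:"

def strip_appointment_headers (text : String) : String :=
  if text = "" then text
  else
    let lines := PySem.Str.splitlines text
    let kept := lines.foldl (fun (kept : List String) ln =>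
      let lt := PySem.Str.strip ln
      if lt = "" then kept ++ [""]
      else
        let ltl := PySem.Str.lower lt
        if pvIsHeader ltl then kept
        else kept ++ [lt]) []
    let st := kept.foldl (fun (st : List String × Bool) ln =>
      if ln = "" then (if st.2 then st else (st.1 ++ [""], true))
      else (st.1 ++ [ln], false)) ([], false)
    PySem.Str.strip (PySem.Str.join "\n" st.1)

-- ===== PORT B =====
def strip_appointment_headers_alt (text : String) : String :=
  let st := (PySem.Str.splitlines text).foldl
    (fun (st : List String × List String) ln =>
      let lt := PySem.Str.strip ln
      if lt = "" then (if st.2 = [] then st else (st.1 ++ [PySem.Str.join "\n" st.2], []))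
      else if pvIsHeader (PySem.Str.lower lt) then st
      else (st.1, st.2 ++ [lt])) ([], [])
  let paras := if st.2 = [] then st.1 else st.1 ++ [PySem.Str.join "\n" st.2]
  PySem.Str.join "\n\n" paras

-- ===== PRECONDITION & SPEC =====
def Spec_strip_appointment_headers (text : String) (out : String) : Prop := out = strip_appointment_headers_alt text
instance (text : String) (out : String) : Decidable (Spec_strip_appointment_headers text out) := by unfold Spec_strip_appointment_headers; infer_instance

-- ===== CLAIM (what is proved, stated in full; the proofs are below) =====
def Claim_equal_strip_appointment_headers : Prop := ∀ (text : String), Dom_strip_appointment_headers text → Spec_strip_appointment_headers text (strip_appointment_headers text)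

-- ===== LEMMAS AND PROOFS =====

-- the per-line filter both programs apply: blank ↦ [""], header ↦ [], other ↦ [stripped line]
def pvFilt (ln : String) : List String :=
  let lt := PySem.Str.strip ln
  if lt = "" then [""] else if pvIsHeader (PySem.Str.lower lt) then [] else [lt]

-- A's collapse state machine, as a function of the remaining kept lines and prev_blank
def pvColl : Bool → List String → List String
  | _, [] => []
  | prev, ln :: t => if ln = "" then (if prev then pvColl true t else "" :: pvColl true t) else ln :: pvColl false t

-- B's grouping into paragraphs (runs of non-blank kept lines), with the open group as carry
def pvGrp (cur : List String) : List String → List (List String)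
  | [] => if cur = [] then [] else [cur]
  | e :: t => if e = "" then (if cur = [] then pvGrp [] t else cur :: pvGrp [] t) else pvGrp (cur ++ [e]) t

-- paragraphs interleaved with single blank lines
def pvInterB : List (List String) → List String
  | [] => []
  | [g] => g
  | g :: g' :: t => g ++ "" :: pvInterB (g' :: t)

def pvTrimR (l : List String) : List String := (l.reverse.dropWhile (· == "")).reverse

-- a string is clean if its first and last characters are not whitespace (e.g. output of strip)
def pvClean (e : List Char) : Prop :=
  (∀ c, e.head? = some c → PySem.Chars.isspace c = false) ∧
  (∀ c, e.getLast? = some c → PySem.Chars.isspace c = false)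

theorem pvFoldlA (lines : List String) (acc : List String) :
    lines.foldl (fun (kept : List String) ln =>
      if PySem.Str.strip ln = "" then kept ++ [""]
      else if pvIsHeader (PySem.Str.lower (PySem.Str.strip ln)) then kept
      else kept ++ [PySem.Str.strip ln]) acc = acc ++ lines.flatMap pvFilt := by
  induction lines generalizing acc with
  | nil => simp
  | cons ln t ih =>
    simp only [List.foldl_cons, List.flatMap_cons, ih, pvFilt]
    split_ifs <;> simp

theorem pvFoldlColl (kept : List String) (out : List String) (prev : Bool) :
    (kept.foldl (fun (st : List String × Bool) ln =>
      if ln = "" then (if st.2 then st else (st.1 ++ [""], true))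
      else (st.1 ++ [ln], false)) (out, prev)).1 = out ++ pvColl prev kept := by
  induction kept generalizing out prev with
  | nil => simp [pvColl]
  | cons ln t ih =>
    simp only [List.foldl_cons, pvColl]
    split_ifs <;> simp [*, ih]

theorem pvFoldlB (lines : List String) (st : List String × List String) :
    lines.foldl (fun (st : List String × List String) ln =>
      if PySem.Str.strip ln = "" then (if st.2 = [] then st else (st.1 ++ [PySem.Str.join "\n" st.2], []))
      else if pvIsHeader (PySem.Str.lower (PySem.Str.strip ln)) then st
      else (st.1, st.2 ++ [PySem.Str.strip ln])) st
    = (lines.flatMap pvFilt).foldl (fun (st : List String × List String) e =>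
        if e = "" then (if st.2 = [] then st else (st.1 ++ [PySem.Str.join "\n" st.2], []))
        else (st.1, st.2 ++ [e])) st := by
  induction lines generalizing st with
  | nil => simp
  | cons ln t ih =>
    simp only [List.foldl_cons, List.flatMap_cons, List.foldl_append, pvFilt]
    split_ifs <;> simp [*, ih]

theorem pvFoldlBGrp (kept : List String) (paras : List String) (cur : List String) :
    (let st := kept.foldl (fun (st : List String × List String) e =>
        if e = "" then (if st.2 = [] then st else (st.1 ++ [PySem.Str.join "\n" st.2], []))
        else (st.1, st.2 ++ [e])) (paras, cur)
     if st.2 = [] then st.1 else st.1 ++ [PySem.Str.join "\n" st.2])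
    = paras ++ (pvGrp cur kept).map (PySem.Str.join "\n") := by
  induction kept generalizing paras cur with
  | nil => simp only [List.foldl_nil, pvGrp]; split_ifs <;> simp [*]
  | cons e t ih =>
    simp only [List.foldl_cons, pvGrp]
    by_cases h1 : e = ""
    · by_cases h2 : cur = []
      · simpa [h1, h2] using ih paras cur
      · simpa [h1, h2] using ih (paras ++ [PySem.Str.join "\n" cur]) []
    · simpa [h1] using ih paras (cur ++ [e])

theorem pvGrp_ne_nil (t : List String) (cur : List String) :
    ∀ g ∈ pvGrp cur t, g ≠ [] := by
  induction t generalizing cur with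
  | nil =>
    intro g hg; unfold pvGrp at hg
    split at hg
    · simp at hg
    · next h => simp at hg; simpa [hg] using h
  | cons e t ih =>
    intro g hg; unfold pvGrp at hg
    split at hg
    · split at hg
      · exact ih _ g hg
      · next h =>
        rcases List.mem_cons.mp hg with h' | h'
        · simpa [h'] using h
        · exact ih _ g h'
    · exact ih _ g hg

theorem pvGrp_ne_nil_of_cur (t : List String) (cur : List String) (hc : cur ≠ []) :
    pvGrp cur t ≠ [] := by
  induction t generalizing cur with
  | nil => simp [pvGrp, hc]
  | cons e t ih =>
    unfold pvGrp
    by_cases h1 : e = ""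
    · by_cases h2 : cur = []
      · exact absurd h2 hc
      · simp [h1, h2]
    · simp only [if_neg h1]
      exact ih (cur ++ [e]) (by simp)

theorem pvInterB_cons (g : List String) (gs : List (List String)) (h : gs ≠ []) :
    pvInterB (g :: gs) = g ++ "" :: pvInterB gs := by
  cases gs with
  | nil => exact absurd rfl h
  | cons g' t => rfl

theorem pvInterB_ne_nil (gs : List (List String)) (h0 : gs ≠ []) (h : ∀ g ∈ gs, g ≠ []) :
    pvInterB gs ≠ [] := by
  cases gs with
  | nil => exact absurd rfl h0
  | cons g t =>
    cases t with
    | nil => simpa [pvInterB] using h g (by simp)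
    | cons g' t' => simp [pvInterB]

theorem pvGrp_nil_iff (t : List String) : pvGrp [] t = [] ↔ pvColl true t = [] := by
  induction t with
  | nil => simp [pvGrp, pvColl]
  | cons e t ih =>
    unfold pvGrp pvColl
    by_cases h : e = ""
    · simpa [h] using ih
    · simp [h, pvGrp_ne_nil_of_cur t [e] (by simp)]

theorem pvDropWhile_collTrue (t : List String) :
    (pvColl true t).dropWhile (· == "") = pvColl true t := by
  induction t with
  | nil => simp [pvColl]
  | cons e t ih =>
    unfold pvColl
    by_cases h : e = "" <;> simp [h, ih]

theorem pvDropWhile_collFalse (t : List String) :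
    (pvColl false t).dropWhile (· == "") = pvColl true t := by
  cases t with
  | nil => simp [pvColl]
  | cons e t =>
    unfold pvColl
    by_cases h : e = "" <;> simp [h, pvDropWhile_collTrue]

theorem pvTrimR_cons (a : String) (l : List String) :
    pvTrimR (a :: l) = if pvTrimR l = [] then pvTrimR [a] else a :: pvTrimR l := by
  by_cases h : l.reverse.dropWhile (· == "") = [] <;>
    simp [pvTrimR, List.dropWhile_append, h, List.reverse_append]

theorem pvMain (t : List String) :
    pvTrimR (pvColl true t) = pvInterB (pvGrp [] t) ∧
    ∀ cur : List String, cur ≠ [] → pvInterB (pvGrp cur t) = cur ++ pvTrimR (pvColl false t) := by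
  induction t with
  | nil =>
    constructor
    · simp [pvColl, pvTrimR, pvGrp, pvInterB]
    · intro cur hc; simp [pvGrp, hc, pvInterB, pvColl, pvTrimR]
  | cons e t ih =>
    obtain ⟨ih1, ih2⟩ := ih
    by_cases he : e = ""
    · subst he
      constructor
      · simpa [pvColl, pvGrp] using ih1
      · intro cur hc
        rw [show pvGrp cur ("" :: t) = cur :: pvGrp [] t from by simp [pvGrp, hc],
            show pvColl false ("" :: t) = "" :: pvColl true t from by simp [pvColl]]
        by_cases hgr : pvGrp [] t = []
        · have hct : pvColl true t = [] := (pvGrp_nil_iff t).mp hgr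
          simp [hgr, hct, pvInterB, pvTrimR]
        · have hne : pvTrimR (pvColl true t) ≠ [] := by
            rw [ih1]
            exact pvInterB_ne_nil _ hgr (pvGrp_ne_nil t [])
          rw [pvInterB_cons cur _ hgr, pvTrimR_cons, if_neg hne, ih1]
    · have hstep : pvTrimR (e :: pvColl false t) = e :: pvTrimR (pvColl false t) := by
        rw [pvTrimR_cons]
        by_cases h : pvTrimR (pvColl false t) = [] <;> simp [h, pvTrimR, he]
      constructor
      · rw [show pvColl true (e :: t) = e :: pvColl false t by simp [pvColl, he], hstep,
            show pvGrp [] (e :: t) = pvGrp [e] t by simp [pvGrp, he],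
            ih2 [e] (by simp)]
        simp
      · intro cur hc
        rw [show pvGrp cur (e :: t) = pvGrp (cur ++ [e]) t by simp [pvGrp, he],
            ih2 (cur ++ [e]) (by simp),
            show pvColl false (e :: t) = e :: pvColl false t by simp [pvColl, he], hstep]
        simp

-- char-level lemmas about strip/join

theorem pvJoin_append (sep : List Char) (X Y : List (List Char)) (hX : X ≠ []) (hY : Y ≠ []) :
    PySem.Chars.join sep (X ++ Y) = PySem.Chars.join sep X ++ sep ++ PySem.Chars.join sep Y := by
  induction X with
  | nil => exact absurd rfl hX
  | cons x X' ih =>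
    cases X' with
    | nil =>
      cases Y with
      | nil => exact absurd rfl hY
      | cons y Y' => simp [PySem.Chars.join_cons_cons, PySem.Chars.join_singleton]
    | cons x2 X'' =>
      have : (x :: x2 :: X'') ++ Y = x :: ((x2 :: X'') ++ Y) := rfl
      rw [this, show (x2 :: X'') ++ Y = x2 :: (X'' ++ Y) from rfl,
          PySem.Chars.join_cons_cons, show (x2 : List Char) :: (X'' ++ Y) = (x2 :: X'') ++ Y from rfl,
          ih (by simp), PySem.Chars.join_cons_cons]
      simp

theorem pvJoin_reverse (M : List (List Char)) :
    (PySem.Chars.join ['\n'] M).reverse = PySem.Chars.join ['\n'] (M.reverse.map List.reverse) := by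
  induction M with
  | nil => simp [PySem.Chars.join_nil]
  | cons x t ih =>
    cases t with
    | nil => simp [PySem.Chars.join_singleton]
    | cons y t' =>
      rw [PySem.Chars.join_cons_cons]
      have hX : ((y :: t').reverse.map List.reverse : List (List Char)) ≠ [] := by simp
      calc (x ++ ['\n'] ++ PySem.Chars.join ['\n'] (y :: t')).reverse
          = (PySem.Chars.join ['\n'] (y :: t')).reverse ++ ['\n'] ++ x.reverse := by simp
        _ = PySem.Chars.join ['\n'] ((y :: t').reverse.map List.reverse) ++ ['\n'] ++
              PySem.Chars.join ['\n'] [x.reverse] := by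
              rw [ih, PySem.Chars.join_singleton]
        _ = PySem.Chars.join ['\n'] ((y :: t').reverse.map List.reverse ++ [x.reverse]) := by
              rw [pvJoin_append _ _ _ hX (by simp)]
        _ = PySem.Chars.join ['\n'] ((x :: y :: t').reverse.map List.reverse) := by simp

theorem pvLstrip_id (e r : List Char) (he : e ≠ []) (hc : pvClean e) :
    PySem.Chars.lstrip (e ++ r) = e ++ r := by
  cases e with
  | nil => exact absurd rfl he
  | cons c cs =>
    have : PySem.Chars.isspace c = false := hc.1 c rfl
    simp [PySem.Chars.lstrip, List.dropWhile_cons, this]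

theorem pvLstrip_join (M : List (List Char)) (h : ∀ e ∈ M, pvClean e) :
    PySem.Chars.lstrip (PySem.Chars.join ['\n'] M) = PySem.Chars.join ['\n'] (M.dropWhile List.isEmpty) := by
  induction M with
  | nil => simp [PySem.Chars.join_nil, PySem.Chars.lstrip]
  | cons e t ih =>
    by_cases he : e = []
    · subst he
      cases t with
      | nil => simp [PySem.Chars.join_singleton, PySem.Chars.join_nil, PySem.Chars.lstrip]
      | cons y t' =>
        rw [PySem.Chars.join_cons_cons]
        have hsp : PySem.Chars.isspace '\n' = true := by decide
        have : PySem.Chars.lstrip ([] ++ ['\n'] ++ PySem.Chars.join ['\n'] (y :: t'))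
            = PySem.Chars.lstrip (PySem.Chars.join ['\n'] (y :: t')) := by
          simp [PySem.Chars.lstrip, List.dropWhile_cons, hsp]
        rw [this, ih (fun e he' => h e (List.mem_cons_of_mem _ he'))]
        simp
    · have hcl : pvClean e := h e (by simp)
      have hdw : (e :: t).dropWhile List.isEmpty = e :: t := by
        simp [List.dropWhile_cons, List.isEmpty_iff, he]
      rw [hdw]
      cases t with
      | nil => rw [PySem.Chars.join_singleton, show (e : List Char) = e ++ [] by simp,
                   pvLstrip_id e [] he hcl]
      | cons y t' =>
        rw [PySem.Chars.join_cons_cons, List.append_assoc,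
            pvLstrip_id e (['\n'] ++ PySem.Chars.join ['\n'] (y :: t')) he hcl,
            ← List.append_assoc]

theorem pvClean_reverse (e : List Char) (hc : pvClean e) : pvClean e.reverse := by
  constructor
  · intro c hcc; exact hc.2 c (by simpa using hcc)
  · intro c hcc; exact hc.1 c (by simpa using hcc)

theorem pvStrip_join (M : List (List Char)) (h : ∀ e ∈ M, pvClean e) :
    PySem.Chars.strip (PySem.Chars.join ['\n'] M)
    = PySem.Chars.join ['\n'] (((M.dropWhile List.isEmpty).reverse.dropWhile List.isEmpty).reverse) := by
  have hM1 : ∀ e ∈ M.dropWhile List.isEmpty, pvClean e := by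
    intro e he; exact h e ((List.dropWhile_sublist _).mem he)
  have hM2 : ∀ e ∈ (M.dropWhile List.isEmpty).reverse.map List.reverse, pvClean e := by
    intro e he
    obtain ⟨a, ha, rfl⟩ := List.mem_map.mp he
    exact pvClean_reverse a (hM1 a (by simpa using ha))
  have hrs : ∀ l : List Char, PySem.Chars.rstrip l = (PySem.Chars.lstrip l.reverse).reverse := by
    intro l; rfl
  rw [show PySem.Chars.strip (PySem.Chars.join ['\n'] M)
        = PySem.Chars.rstrip (PySem.Chars.lstrip (PySem.Chars.join ['\n'] M)) from rfl,
      pvLstrip_join M h, hrs, pvJoin_reverse, pvLstrip_join _ hM2, List.dropWhile_map]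
  have hcomp : (List.isEmpty ∘ (List.reverse : List Char → List Char)) = List.isEmpty := by
    funext l; simp [List.isEmpty_iff]
  rw [hcomp, pvJoin_reverse]
  congr 1
  simp [← List.map_reverse, List.map_map, Function.comp_def]

theorem pvHead_dropWhile (l : List Char) (c : Char)
    (h : (l.dropWhile PySem.Chars.isspace).head? = some c) : PySem.Chars.isspace c = false := by
  induction l with
  | nil => simp at h
  | cons a l ih =>
    rw [List.dropWhile_cons] at h
    split at h
    · exact ih h
    · next hn =>
      simp only [List.head?_cons, Option.some.injEq] at h
      subst h
      simpa using hn

theorem pvClean_strip (s : String) : pvClean (PySem.Str.strip s).toList := by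
  rw [PySem.Str.toList_strip]
  constructor
  · intro c hc
    obtain ⟨p, hp⟩ := List.dropWhile_suffix (l := (PySem.Chars.lstrip s.toList).reverse) PySem.Chars.isspace
    have hc' : ((List.dropWhile PySem.Chars.isspace (PySem.Chars.lstrip s.toList).reverse).reverse).head? = some c := hc
    have h2 := congrArg List.reverse hp
    simp only [List.reverse_append, List.reverse_reverse] at h2
    have hL : (PySem.Chars.lstrip s.toList).head? = some c := by
      cases hd : (List.dropWhile PySem.Chars.isspace (PySem.Chars.lstrip s.toList).reverse).reverse with
      | nil => rw [hd] at hc'; simp at hc'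
      | cons a d' =>
        rw [hd] at hc' h2
        simp only [List.head?_cons, Option.some.injEq] at hc'
        subst hc'
        rw [← h2]
        rfl
    exact pvHead_dropWhile s.toList c hL
  · intro c hc
    have hc2 : ((List.dropWhile PySem.Chars.isspace (PySem.Chars.lstrip s.toList).reverse).reverse).getLast? = some c := hc
    rw [List.getLast?_reverse] at hc2
    exact pvHead_dropWhile _ c hc2

theorem pvClean_empty : pvClean ("" : String).toList := by
  constructor <;> intro c hc <;> simp [show ("" : String).toList = [] from rfl] at hc

theorem pvClean_filt (ln : String) : ∀ e ∈ pvFilt ln, pvClean e.toList := by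
  intro e he
  simp only [pvFilt] at he
  split_ifs at he with h1 h2
  · simp only [List.mem_singleton] at he; subst he; exact pvClean_empty
  · simp at he
  · simp only [List.mem_singleton] at he; subst he; exact pvClean_strip ln

theorem pvMem_coll (b : Bool) (kept : List String) (e : String) (he : e ∈ pvColl b kept) :
    e = "" ∨ e ∈ kept := by
  induction kept generalizing b with
  | nil => simp [pvColl] at he
  | cons x t ih =>
    unfold pvColl at he
    split_ifs at he with h1 h2
    · rcases ih true he with h | h
      · exact Or.inl h
      · exact Or.inr (List.mem_cons_of_mem _ h)
    · rcases List.mem_cons.mp he with h | h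
      · exact Or.inl h
      · rcases ih true h with h' | h'
        · exact Or.inl h'
        · exact Or.inr (List.mem_cons_of_mem _ h')
    · rcases List.mem_cons.mp he with h | h
      · subst h; exact Or.inr (by simp)
      · rcases ih false h with h' | h'
        · exact Or.inl h'
        · exact Or.inr (List.mem_cons_of_mem _ h')

theorem pvClean_coll (b : Bool) (kept : List String) (h : ∀ e ∈ kept, pvClean e.toList) :
    ∀ e ∈ pvColl b kept, pvClean e.toList := by
  intro e he
  rcases pvMem_coll b kept e he with h' | h'
  · subst h'; exact pvClean_empty
  · exact h e h'

-- char-level join of interleaved paragraphs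
theorem pvJoin_interB (gs : List (List String)) (h : ∀ g ∈ gs, g ≠ []) :
    PySem.Chars.join ['\n'] ((pvInterB gs).map String.toList)
    = PySem.Chars.join ['\n', '\n'] ((gs.map (PySem.Str.join "\n")).map String.toList) := by
  induction gs with
  | nil => simp [pvInterB, PySem.Chars.join_nil]
  | cons g t ih =>
    cases t with
    | nil =>
      simp only [pvInterB, List.map_cons, List.map_nil, PySem.Chars.join_singleton,
        PySem.Str.toList_join]
      rw [show ("\n" : String).toList = ['\n'] from by decide]
    | cons g' t' =>
      have hg : (g.map String.toList : List (List Char)) ≠ [] := by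
        simpa using h g (by simp)
      have hrest : pvInterB (g' :: t') ≠ [] :=
        pvInterB_ne_nil _ (by simp) (fun x hx => h x (by simp [hx]))
      have ihr := ih (fun x hx => h x (by simp [hx]))
      rw [pvInterB_cons g _ (by simp)]
      cases hr : pvInterB (g' :: t') with
      | nil => exact absurd hr hrest
      | cons r0 rr =>
        rw [hr] at ihr
        calc PySem.Chars.join ['\n'] ((g ++ "" :: r0 :: rr).map String.toList)
            = PySem.Chars.join ['\n'] (g.map String.toList ++ ([] :: r0.toList :: rr.map String.toList)) := by
              simp [show ("" : String).toList = [] from rfl]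
          _ = PySem.Chars.join ['\n'] (g.map String.toList) ++ ['\n'] ++
                PySem.Chars.join ['\n'] ([] :: r0.toList :: rr.map String.toList) := by
              rw [pvJoin_append _ _ _ hg (by simp)]
          _ = PySem.Chars.join ['\n'] (g.map String.toList) ++ ['\n', '\n'] ++
                PySem.Chars.join ['\n'] ((r0 :: rr).map String.toList) := by
              rw [PySem.Chars.join_cons_cons]
              simp
          _ = PySem.Chars.join ['\n'] (g.map String.toList) ++ ['\n', '\n'] ++
                PySem.Chars.join ['\n', '\n'] (((g' :: t').map (PySem.Str.join "\n")).map String.toList) := by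
              rw [ihr]
          _ = PySem.Chars.join ['\n', '\n'] (((g :: g' :: t').map (PySem.Str.join "\n")).map String.toList) := by
              simp only [List.map_cons, PySem.Chars.join_cons_cons, PySem.Str.toList_join]
              rw [show ("\n" : String).toList = ['\n'] from by decide]

-- ===== VERDICT (by name: the statement is the Claim_ definition above) =====
theorem strip_appointment_headers_spec : Claim_equal_strip_appointment_headers := by
  intro text _
  unfold Spec_strip_appointment_headers
  by_cases h0 : text = ""
  · subst h0; decide
  · simp only [strip_appointment_headers, strip_appointment_headers_alt, if_neg h0]
    rw [pvFoldlA, pvFoldlB, pvFoldlColl]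
    have hBG := pvFoldlBGrp ((PySem.Str.splitlines text).flatMap pvFilt) [] []
    simp only at hBG
    rw [hBG]
    set kept := (PySem.Str.splitlines text).flatMap pvFilt with hkept
    simp only [List.nil_append]
    -- reduce both sides to String.ofList of char-level joins
    have hclean : ∀ e ∈ (pvColl false kept).map String.toList, pvClean e := by
      intro e he
      obtain ⟨a, ha, rfl⟩ := List.mem_map.mp he
      refine pvClean_coll false kept ?_ a ha
      intro x hx
      obtain ⟨ln, _, hmem⟩ := List.mem_flatMap.mp hx
      exact pvClean_filt ln x hmem
    have hA : PySem.Str.strip (PySem.Str.join "\n" (pvColl false kept))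
        = String.ofList (PySem.Chars.strip (PySem.Chars.join ['\n'] ((pvColl false kept).map String.toList))) := by
      rw [show PySem.Str.strip (PySem.Str.join "\n" (pvColl false kept))
            = String.ofList (PySem.Chars.strip ((PySem.Str.join "\n" (pvColl false kept)).toList)) from rfl,
          PySem.Str.toList_join, show ("\n" : String).toList = ['\n'] from by decide]
    have hB : PySem.Str.join "\n\n" ((pvGrp [] kept).map (PySem.Str.join "\n"))
        = String.ofList (PySem.Chars.join ['\n', '\n'] (((pvGrp [] kept).map (PySem.Str.join "\n")).map String.toList)) := by
      rw [show PySem.Str.join "\n\n" ((pvGrp [] kept).map (PySem.Str.join "\n"))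
            = String.ofList (PySem.Chars.join ("\n\n" : String).toList (((pvGrp [] kept).map (PySem.Str.join "\n")).map String.toList)) from rfl,
          show ("\n\n" : String).toList = ['\n', '\n'] from by decide]
    rw [hA, hB]
    refine congrArg String.ofList ?_
    rw [pvStrip_join _ hclean]
    -- commute dropWhile/reverse with map toList
    have hpred : (List.isEmpty ∘ String.toList) = (fun s => s == "") := by
      funext x
      simp only [Function.comp_apply]
      by_cases hx : x = ""
      · subst hx; rfl
      · have h3 : (x == "") = false := beq_eq_false_iff_ne.mpr hx
        have h1 : x.toList ≠ [] := by simpa [String.toList_eq_nil_iff] using hx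
        rw [h3, List.isEmpty_eq_false_iff]
        exact h1
    have hcomm : (((((pvColl false kept).map String.toList).dropWhile List.isEmpty).reverse.dropWhile List.isEmpty).reverse : List (List Char))
        = (pvTrimR ((pvColl false kept).dropWhile (· == ""))).map String.toList := by
      rw [List.dropWhile_map, hpred, ← List.map_reverse, List.dropWhile_map, hpred, ← List.map_reverse]
      rfl
    rw [hcomm, pvDropWhile_collFalse, (pvMain kept).1]
    exact pvJoin_interB (pvGrp [] kept) (pvGrp_ne_nil kept [])
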